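-- pv_equiv track=rewrite | github.com/quanmcvn/staircase | src/test/run_nurse_rostering.py | eval_window
-- ===== SOURCE A (Python) =====
-- def eval_window(x: str, value: str, window_size: int, floor, cap):
-- 	if len(x) < window_size:
-- 		return True
-- 	now = 0
-- 	if floor is None:
-- 		floor = 0
-- 	if cap is None:
-- 		cap = window_size
-- 	for i in range(0, len(x)):
-- 		if i >= window_size:
-- 			if not (floor <= now <= cap):
-- 				return False
-- 			now -= 1 if x[i - window_size] == value else 0
-- 		now += 1 if x[i] == value else 0
-- 	if not (floor <= now <= cap):
-- 		return False
-- 	return True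
-- ===== SOURCE B (Python) =====
-- def eval_window(x: str, value: str, window_size: int, floor, cap):
--     if len(x) < window_size:
--         return True
--     if floor is None:
--         floor = 0
--     if cap is None:
--         cap = window_size
--     # prefix counts: P[k] = number of matches of `value` among x[:k]
--     P = [0]
--     for ch in x:
--         P.append(P[-1] + (1 if ch == value else 0))
--     for s in range(len(x) - window_size + 1):
--         cnt = P[s + window_size] - P[s]
--         if not (floor <= cnt <= cap):
--             return False
--     return True
-- ===== Notes on version B (the rewrite author's own statement) =====
-- stated objective: alternative
-- what changed: Replaces A's incremental single-pointer sliding counter (add entering char, subtract leaving char, mid-loop checks plus a trailing check) with a precomputed prefix-count table and one uniform scan over window start positions computing each count as a prefix difference.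
-- outside the precondition, e.g. on eval_window('a', 'a', -1, None, None): A returns False, B returns False; on eval_window('ab', 'a', -1, 0, 5): A raises IndexError, B returns False; on eval_window('', 'a', -2, None, None): A returns False, B raises IndexError
import Mathlib
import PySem

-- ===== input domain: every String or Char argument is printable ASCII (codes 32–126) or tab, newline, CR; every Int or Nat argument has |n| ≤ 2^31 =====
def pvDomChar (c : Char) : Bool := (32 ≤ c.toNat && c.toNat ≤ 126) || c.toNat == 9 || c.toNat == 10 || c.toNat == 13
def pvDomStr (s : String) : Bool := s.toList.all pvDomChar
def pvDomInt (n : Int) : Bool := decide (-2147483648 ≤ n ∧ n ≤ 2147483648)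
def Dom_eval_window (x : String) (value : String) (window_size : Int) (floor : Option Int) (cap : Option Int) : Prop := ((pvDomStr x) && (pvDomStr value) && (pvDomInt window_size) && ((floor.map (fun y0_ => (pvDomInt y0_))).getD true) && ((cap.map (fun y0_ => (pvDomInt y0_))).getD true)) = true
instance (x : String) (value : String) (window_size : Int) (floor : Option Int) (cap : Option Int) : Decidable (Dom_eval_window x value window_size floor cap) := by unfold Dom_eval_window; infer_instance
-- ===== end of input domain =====

-- B replaces A's incremental sliding counter with a prefix-count table plus a scan over
-- window start positions (objective: alternative, same cost). Proved equal for
-- window_size ≥ 0 (Pre_); for negative window_size A indexes x past its end (IndexError)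
-- unless an early bound check returns False first.

-- ===== PORT A =====
-- x[i] == value  (x[i] is a one-character string)
def pvHit (v : List Char) (c : Char) : Int := if [c] = v then 1 else 0

-- A's for-loop over i in range(0, len(x)); returns none on the early `return False`,
-- otherwise `some now` (final value of the counter).
def pvEvA_loop (xs v : List Char) (ws fl cp : Int) : List Int → Int → Option Int
  | [], now => some now
  | i :: rest, now =>
    if ws ≤ i then
      if ¬ (fl ≤ now ∧ now ≤ cp) then none
      else
        pvEvA_loop xs v ws fl cp rest
          ((now - ((PySem.List.pyGet? xs (i - ws)).map (pvHit v)).getD 0)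
            + ((PySem.List.pyGet? xs i).map (pvHit v)).getD 0)
    else
      pvEvA_loop xs v ws fl cp rest (now + ((PySem.List.pyGet? xs i).map (pvHit v)).getD 0)

def eval_window (x : String) (value : String) (window_size : Int) (floor : Option Int) (cap : Option Int) : Bool :=
  let xs := x.toList
  let n : Int := xs.length
  if n < window_size then true
  else
    let fl := floor.getD 0
    let cp := cap.getD window_size
    match pvEvA_loop xs value.toList window_size fl cp (PySem.List.pyRange 0 n 1) 0 with
    | none => false
    | some now => decide (fl ≤ now ∧ now ≤ cp)

-- ===== PORT B =====
-- ch == value  (ch is a one-character string)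
def pvHitB (v : List Char) (c : Char) : Int := if [c] = v then 1 else 0

-- P = [0]; for ch in x: P.append(P[-1] + (1 if ch == value else 0))
def pvPrefix (v : List Char) (acc : Int) : List Char → List Int
  | [] => [acc]
  | c :: rest => acc :: pvPrefix v (acc + pvHitB v c) rest

-- for s in range(len(x) - window_size + 1): early `return False` on a bad window
def pvEvB_loop (P : List Int) (ws fl cp : Int) : List Int → Bool
  | [] => true
  | s :: rest =>
    let cnt := PySem.List.pyGetD P (s + ws) 0 - PySem.List.pyGetD P s 0
    if ¬ (fl ≤ cnt ∧ cnt ≤ cp) then false else pvEvB_loop P ws fl cp rest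

def eval_window_alt (x : String) (value : String) (window_size : Int) (floor : Option Int) (cap : Option Int) : Bool :=
  let xs := x.toList
  let n : Int := xs.length
  if n < window_size then true
  else
    let fl := floor.getD 0
    let cp := cap.getD window_size
    let P := pvPrefix value.toList 0 xs
    pvEvB_loop P window_size fl cp (PySem.List.pyRange 0 (n - window_size + 1) 1)

-- ===== PRECONDITION & SPEC =====
-- Pre_ excludes negative window_size: there A reads x[i - window_size] past the end of x and
-- raises IndexError unless an early bound check returns False first (and B's prefix-table
-- indexing is equally out of range), so the region mixes crashes with accidental values.
def Pre_eval_window (x : String) (value : String) (window_size : Int) (floor : Option Int) (cap : Option Int) : Prop := 0 ≤ window_size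
instance (x : String) (value : String) (window_size : Int) (floor : Option Int) (cap : Option Int) : Decidable (Pre_eval_window x value window_size floor cap) := by unfold Pre_eval_window; infer_instance

def pvWitness_eval_window : String × String × Int × Option Int × Option Int := ("abba", "a", 2, none, some 1)

def Spec_eval_window (x : String) (value : String) (window_size : Int) (floor : Option Int) (cap : Option Int) (out : Bool) : Prop := out = eval_window_alt x value window_size floor cap
instance (x : String) (value : String) (window_size : Int) (floor : Option Int) (cap : Option Int) (out : Bool) : Decidable (Spec_eval_window x value window_size floor cap out) := by unfold Spec_eval_window; infer_instance

-- ===== CLAIM (what is proved, stated in full; the proofs are below) =====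
def Claim_equal_eval_window : Prop := ∀ (x : String) (value : String) (window_size : Int) (floor : Option Int) (cap : Option Int), Dom_eval_window x value window_size floor cap → Pre_eval_window x value window_size floor cap → Spec_eval_window x value window_size floor cap (eval_window x value window_size floor cap)

-- ===== LEMMAS AND PROOFS =====

-- number of matches among the first k characters
def pvC (xs v : List Char) (k : ℕ) : Int := ((xs.take k).countP (fun c => [c] = v) : ℕ)

theorem pvC_zero (xs v : List Char) : pvC xs v 0 = 0 := by simp [pvC]

theorem pvC_succ (xs v : List Char) (k : ℕ) (hk : k < xs.length) :
    pvC xs v (k + 1) = pvC xs v k + pvHit v xs[k] := by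
  have h : xs.take (k + 1) = xs.take k ++ [xs[k]] := by
    rw [List.take_add_one]
    simp [List.getElem?_eq_getElem, hk]
  rw [pvC, pvC, h, List.countP_append]
  simp only [List.countP_cons, List.countP_nil, Nat.zero_add, pvHit]
  by_cases hc : [xs[k]] = v
  · simp only [decide_eq_true hc, if_pos hc, if_true]
    push_cast; ring
  · simp only [decide_eq_false hc, if_neg hc, Bool.false_eq_true, if_false]
    push_cast; ring

theorem pvHit_of_get (xs v : List Char) (k : ℕ) (hk : k < xs.length) :
    ((PySem.List.pyGet? xs (k : Int)).map (pvHit v)).getD 0 = pvHit v xs[k] := by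
  simp [PySem.List.pyGet?_natCast, List.getElem?_eq_getElem, hk]

theorem pvPrefix_get (v : List Char) :
    ∀ (xs : List Char) (a : Int) (k : ℕ), k ≤ xs.length →
      PySem.List.pyGetD (pvPrefix v a xs) (k : Int) 0 = a + pvC xs v k := by
  intro xs
  induction xs with
  | nil =>
    intro a k hk
    have hk0 : k = 0 := by simpa using hk
    subst hk0
    simp [pvPrefix, pvC, PySem.List.pyGetD_zero_cons]
  | cons c rest ih =>
    intro a k hk
    cases k with
    | zero => simp [pvPrefix, pvC]
    | succ k =>
      have hk' : k ≤ rest.length := by simpa using hk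
      have ihk := ih (a + pvHitB v c) k hk'
      rw [PySem.List.pyGetD_natCast] at ihk ⊢
      simp only [pvPrefix, List.getD_cons_succ]
      rw [ihk]
      have hC : pvC (c :: rest) v (k + 1) = pvHitB v c + pvC rest v k := by
        rw [pvC, pvC, List.take_succ_cons, List.countP_cons]
        simp only [pvHitB]
        by_cases hc : [c] = v
        · simp only [decide_eq_true hc, if_pos hc, if_true]
          push_cast; ring
        · simp only [decide_eq_false hc, if_neg hc, Bool.false_eq_true, if_false]
          push_cast; ring
      rw [hC]; ring

-- B's loop returns the conjunction of its per-window checks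
theorem pvEvB_loop_all (P : List Int) (ws fl cp : Int) :
    ∀ l : List Int, pvEvB_loop P ws fl cp l
      = l.all (fun s => decide (fl ≤ PySem.List.pyGetD P (s + ws) 0 - PySem.List.pyGetD P s 0
          ∧ PySem.List.pyGetD P (s + ws) 0 - PySem.List.pyGetD P s 0 ≤ cp)) := by
  intro l
  induction l with
  | nil => simp [pvEvB_loop]
  | cons s rest ih =>
    simp only [pvEvB_loop, List.all_cons]
    by_cases h : fl ≤ PySem.List.pyGetD P (s + ws) 0 - PySem.List.pyGetD P s 0
        ∧ PySem.List.pyGetD P (s + ws) 0 - PySem.List.pyGetD P s 0 ≤ cp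
    · rw [if_neg (not_not_intro h), ih, decide_eq_true h, Bool.true_and]
    · rw [if_pos h, decide_eq_false h, Bool.false_and]

-- characterisation of A's loop from position k, for 0 ≤ ws ≤ len
theorem pvEvA_loop_char (xs v : List Char) (ws fl cp : Int) (hws : 0 ≤ ws) :
    ∀ (d k : ℕ), k + d = xs.length →
      pvEvA_loop xs v ws fl cp (PySem.List.pyRange (k : Int) (xs.length : Int) 1)
          (pvC xs v k - pvC xs v (k - ws.toNat))
      = (if (List.range' k d).all
            (fun i => if ws.toNat ≤ i then
                decide (fl ≤ pvC xs v i - pvC xs v (i - ws.toNat)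
                  ∧ pvC xs v i - pvC xs v (i - ws.toNat) ≤ cp) else true)
          then some (pvC xs v xs.length - pvC xs v (xs.length - ws.toNat)) else none) := by
  intro d
  induction d with
  | zero =>
    intro k hk
    have hk' : k = xs.length := by omega
    subst hk'
    rw [PySem.List.pyRange_one_eq_nil (by omega)]
    simp [pvEvA_loop]
  | succ d ih =>
    intro k hk
    have hklt : k < xs.length := by omega
    have hlt : (k : Int) < (xs.length : Int) := by exact_mod_cast hklt
    rw [PySem.List.pyRange_one_cons hlt]
    have hsucc : (k : Int) + 1 = ((k + 1 : ℕ) : Int) := by push_cast; ring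
    simp only [pvEvA_loop]
    by_cases hcase : ws ≤ (k : Int)
    · have hwk : ws.toNat ≤ k := by omega
      simp only [if_pos hcase]
      by_cases hok : fl ≤ pvC xs v k - pvC xs v (k - ws.toNat)
          ∧ pvC xs v k - pvC xs v (k - ws.toNat) ≤ cp
      · rw [if_neg (by exact not_not_intro hok)]
        have hidx : (k : Int) - ws = ((k - ws.toNat : ℕ) : Int) := by omega
        have hkw_lt : k - ws.toNat < xs.length := by omega
        have hstep : (pvC xs v k - pvC xs v (k - ws.toNat)
              - ((PySem.List.pyGet? xs ((k : Int) - ws)).map (pvHit v)).getD 0)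
              + ((PySem.List.pyGet? xs (k : Int)).map (pvHit v)).getD 0
            = pvC xs v (k + 1) - pvC xs v (k + 1 - ws.toNat) := by
          rw [hidx, pvHit_of_get xs v _ hkw_lt, pvHit_of_get xs v _ hklt]
          have h1 : pvC xs v (k + 1) = pvC xs v k + pvHit v xs[k] := pvC_succ xs v k hklt
          have h2 : pvC xs v (k - ws.toNat + 1)
              = pvC xs v (k - ws.toNat) + pvHit v xs[k - ws.toNat] := pvC_succ xs v _ hkw_lt
          have h3 : k + 1 - ws.toNat = k - ws.toNat + 1 := by omega
          rw [h3, h1, h2]; ring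
        rw [hstep, hsucc, ih (k + 1) (by omega)]
        rw [List.range'_succ, List.all_cons]
        rw [if_pos hwk, decide_eq_true hok, Bool.true_and]
      · rw [if_pos hok]
        rw [List.range'_succ, List.all_cons, if_pos hwk]
        have : (decide (fl ≤ pvC xs v k - pvC xs v (k - ws.toNat)
            ∧ pvC xs v k - pvC xs v (k - ws.toNat) ≤ cp)) = false := by
          simpa using hok
        rw [this, Bool.false_and]
        exact (if_neg (by simp)).symm
    · have hwk : ¬ ws.toNat ≤ k := by omega
      simp only [if_neg hcase]
      have hz1 : k - ws.toNat = 0 := by omega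
      have hz2 : k + 1 - ws.toNat = 0 := by omega
      have hstep : pvC xs v k - pvC xs v (k - ws.toNat)
            + ((PySem.List.pyGet? xs (k : Int)).map (pvHit v)).getD 0
          = pvC xs v (k + 1) - pvC xs v (k + 1 - ws.toNat) := by
        rw [hz1, hz2, pvC_zero, pvHit_of_get xs v _ hklt, pvC_succ xs v k hklt]; ring
      rw [hstep, hsucc, ih (k + 1) (by omega)]
      rw [List.range'_succ, List.all_cons, if_neg hwk, Bool.true_and]

theorem pv_all_congr {α : Type} (l : List α) (p q : α → Bool) (h : ∀ a ∈ l, p a = q a) :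
    l.all p = l.all q := by
  induction l with
  | nil => rfl
  | cons a t ih =>
    simp only [List.all_cons, h a (by simp)]
    rw [ih (fun b hb => h b (by simp [hb]))]

-- the two `all`s coincide after reindexing window starts
theorem pv_all_eq (xs v : List Char) (fl cp : Int) (w : ℕ) (hw : w ≤ xs.length) :
    ((List.range' 0 xs.length).all
        (fun i => if w ≤ i then
            decide (fl ≤ pvC xs v i - pvC xs v (i - w) ∧ pvC xs v i - pvC xs v (i - w) ≤ cp)
          else true)
      && decide (fl ≤ pvC xs v xs.length - pvC xs v (xs.length - w)
          ∧ pvC xs v xs.length - pvC xs v (xs.length - w) ≤ cp))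
    = (List.range (xs.length - w + 1)).all
        (fun s => decide (fl ≤ pvC xs v (s + w) - pvC xs v s
            ∧ pvC xs v (s + w) - pvC xs v s ≤ cp)) := by
  have hsplit : List.range' 0 xs.length = List.range' 0 w ++ List.range' w (xs.length - w) := by
    have h := List.range'_append (s := 0) (m := w) (n := xs.length - w) (step := 1)
    simp only [one_mul, Nat.zero_add] at h
    have hlen : xs.length = w + (xs.length - w) := by omega
    conv_lhs => rw [hlen]
    exact h.symm
  rw [hsplit, List.all_append]
  have h1 : (List.range' 0 w).all
      (fun i => if w ≤ i then
          decide (fl ≤ pvC xs v i - pvC xs v (i - w) ∧ pvC xs v i - pvC xs v (i - w) ≤ cp)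
        else true) = true := by
    rw [List.all_eq_true]
    intro i hi
    have : i < w := by have := List.mem_range'_1.mp hi; omega
    simp [Nat.not_le.mpr this]
  rw [h1, Bool.true_and]
  have h2 : List.range' w (xs.length - w) = (List.range (xs.length - w)).map (fun s => s + w) := by
    rw [List.range'_eq_map_range]
    have hf : (fun s => w + s) = (fun s : ℕ => s + w) := by funext s; omega
    rw [hf]
  rw [h2, List.all_map]
  have h3 : ((fun i => if w ≤ i then
        decide (fl ≤ pvC xs v i - pvC xs v (i - w) ∧ pvC xs v i - pvC xs v (i - w) ≤ cp)
      else true) ∘ (fun s => s + w))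
      = fun s => decide (fl ≤ pvC xs v (s + w) - pvC xs v s
          ∧ pvC xs v (s + w) - pvC xs v s ≤ cp) := by
    funext s
    have h4 : w ≤ s + w := by omega
    have h5 : s + w - w = s := by omega
    simp [Function.comp, h4, h5]
  rw [h3, List.range_succ, List.all_append]
  have h6 : xs.length - w + w = xs.length := by omega
  simp [h6]

-- ===== VERDICT (by name: the statement is the Claim_ definition above) =====
theorem eval_window_spec : Claim_equal_eval_window := by
  intro x value window_size floor cap _ hpre
  unfold Spec_eval_window eval_window eval_window_alt
  simp only []
  set xs := x.toList with hxs
  set v := value.toList with hv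
  by_cases hlen : (xs.length : Int) < window_size
  · simp [hlen]
  · simp only [if_neg hlen]
    have hws : 0 ≤ window_size := hpre
    have hwle : window_size.toNat ≤ xs.length := by omega
    set fl := floor.getD 0
    set cp := cap.getD window_size
    have hA := pvEvA_loop_char xs v window_size fl cp hws xs.length 0 (by omega)
    rw [pvC_zero, Nat.zero_sub, pvC_zero, sub_zero] at hA
    simp only [Nat.cast_zero] at hA
    rw [hA]
    rw [pvEvB_loop_all]
    have hrng : PySem.List.pyRange 0 ((xs.length : Int) - window_size + 1) 1
        = (List.range (xs.length - window_size.toNat + 1)).map (fun k : ℕ => (k : Int)) := by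
      have hc : (xs.length : Int) - window_size + 1
          = ((xs.length - window_size.toNat + 1 : ℕ) : Int) := by omega
      rw [hc, PySem.List.pyRange_zero_natCast]
    have hB : ∀ s ∈ PySem.List.pyRange 0 ((xs.length : Int) - window_size + 1) 1,
        (decide (fl ≤ PySem.List.pyGetD (pvPrefix v 0 xs) (s + window_size) 0
              - PySem.List.pyGetD (pvPrefix v 0 xs) s 0
            ∧ PySem.List.pyGetD (pvPrefix v 0 xs) (s + window_size) 0
              - PySem.List.pyGetD (pvPrefix v 0 xs) s 0 ≤ cp))
        = (decide (fl ≤ pvC xs v (s.toNat + window_size.toNat) - pvC xs v s.toNat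
            ∧ pvC xs v (s.toNat + window_size.toNat) - pvC xs v s.toNat ≤ cp)) := by
      intro s hs
      have hb := (PySem.List.mem_pyRange_one).mp hs
      have h1 : s + window_size = ((s.toNat + window_size.toNat : ℕ) : Int) := by omega
      have h2 : s = ((s.toNat : ℕ) : Int) := by omega
      have hg1 : PySem.List.pyGetD (pvPrefix v 0 xs) (s + window_size) 0
          = pvC xs v (s.toNat + window_size.toNat) := by
        rw [h1, pvPrefix_get v xs 0 _ (by omega), zero_add]
      have hg2 : PySem.List.pyGetD (pvPrefix v 0 xs) s 0 = pvC xs v s.toNat := by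
        conv_lhs => rw [h2]
        rw [pvPrefix_get v xs 0 _ (by omega), zero_add]
      rw [hg1, hg2]
    rw [pv_all_congr _ _ _ hB]
    have hall2 : (PySem.List.pyRange 0 ((xs.length : Int) - window_size + 1) 1).all
        (fun s : Int => decide (fl ≤ pvC xs v (s.toNat + window_size.toNat) - pvC xs v s.toNat
            ∧ pvC xs v (s.toNat + window_size.toNat) - pvC xs v s.toNat ≤ cp))
        = (List.range (xs.length - window_size.toNat + 1)).all
        (fun s : ℕ => decide (fl ≤ pvC xs v (s + window_size.toNat) - pvC xs v s
            ∧ pvC xs v (s + window_size.toNat) - pvC xs v s ≤ cp)) := by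
      rw [hrng, List.all_map]
      refine pv_all_congr _ _ _ ?_
      intro s _
      simp [Function.comp]
    rw [hall2, ← pv_all_eq xs v fl cp window_size.toNat hwle]
    by_cases hall : (List.range' 0 xs.length).all
        (fun i => if window_size.toNat ≤ i then
            decide (fl ≤ pvC xs v i - pvC xs v (i - window_size.toNat)
              ∧ pvC xs v i - pvC xs v (i - window_size.toNat) ≤ cp)
          else true) = true
    · rw [if_pos hall, hall, Bool.true_and]
    · rw [if_neg hall, Bool.eq_false_iff.mpr hall, Bool.false_and]
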